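-- pv_equiv track=rewrite | github.com/leuski-ict/reservoir-dogs | TicTacToe/environments/reservoir/Counter.py | base3_to_base5
-- ===== SOURCE A (Python) =====
-- def base3_to_base5(base3_array):
--     # Step 1: Convert base 3 array to decimal
--     decimal = 0
--     for digit in base3_array[::-1]:
--         decimal = decimal * 3 + digit
--
--     # Step 2: Convert decimal to base 5 array
--     if decimal == 0:
--         return [0]
--
--     base5_array = []
--     while decimal > 0:
--         base5_array.append(decimal % 5)
--         decimal //= 5
--
--     return base5_array
-- ===== SOURCE B (Python) =====
-- def base3_to_base5(base3_array):
--     # Digit-wise long division: treat the little-endian base-3 digits as one big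
--     # number and repeatedly divide the digit array by 5, collecting remainders.
--     work = list(reversed(base3_array))  # most significant digit first
--     while work and work[0] == 0:
--         work.pop(0)
--     if not work:
--         return [0]
--     out = []
--     while work:
--         carry = 0
--         quotient = []
--         for d in work:
--             carry = carry * 3 + d
--             quotient.append(carry // 5)
--             carry %= 5
--         out.append(carry)
--         while quotient and quotient[0] == 0:
--             quotient.pop(0)
--         work = quotient
--     return out
-- ===== Notes on version B (the rewrite author's own statement) =====
-- stated objective: alternative
-- what changed: Instead of accumulating a decimal integer by Horner's rule and then peeling it apart with a divmod loop, B performs digit-wise long division by 5 directly on the base-3 digit array, collecting the remainders as the base-5 digits.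
-- outside the precondition, e.g. on base3_to_base5([-1]): A returns [], B does not finish within the time limit
import Mathlib
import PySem

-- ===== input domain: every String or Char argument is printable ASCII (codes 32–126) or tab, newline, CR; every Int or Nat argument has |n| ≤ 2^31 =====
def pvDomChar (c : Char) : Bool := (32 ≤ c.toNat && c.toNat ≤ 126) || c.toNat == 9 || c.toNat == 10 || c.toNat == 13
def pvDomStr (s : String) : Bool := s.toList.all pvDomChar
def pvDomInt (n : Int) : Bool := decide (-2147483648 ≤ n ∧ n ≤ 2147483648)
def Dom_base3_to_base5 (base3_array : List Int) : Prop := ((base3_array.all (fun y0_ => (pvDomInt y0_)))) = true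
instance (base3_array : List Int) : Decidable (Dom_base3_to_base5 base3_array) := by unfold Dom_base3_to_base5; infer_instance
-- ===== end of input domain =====

-- B replaces A's "Horner to one big decimal, then divmod loop" by digit-wise long
-- division by 5 on the base-3 digit array itself (alternative algorithm, same cost).


-- ===== PORT A =====
-- termination helper for A's `while decimal > 0` loop (cited in decreasing_by)
theorem pvFdiv5_toNat_lt (d : Int) (h : 0 < d) : (PySem.Int.floordiv d 5).toNat < d.toNat := by
  rw [PySem.Int.floordiv_eq_ediv_of_pos (by norm_num)]
  omega

-- `while decimal > 0: base5_array.append(decimal % 5); decimal //= 5`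
def aConv (decimal : Int) : List Int :=
  if _h : 0 < decimal then PySem.Int.mod decimal 5 :: aConv (PySem.Int.floordiv decimal 5)
  else []
termination_by decimal.toNat
decreasing_by exact pvFdiv5_toNat_lt decimal _h

def base3_to_base5 (base3_array : List Int) : List Int :=
  -- for digit in base3_array[::-1]: decimal = decimal * 3 + digit
  let decimal := (base3_array.reverse).foldl (fun acc digit => acc * 3 + digit) 0
  if decimal = 0 then [0] else aConv decimal

-- ===== PORT B =====
-- one pass of long division of the big-endian digit list by 5 (the inner for-loop):
-- returns (quotient digits, final carry = remainder)
def divStep (carry : Int) : List Int → List Int × Int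
  | [] => ([], carry)
  | d :: t =>
    let c := carry * 3 + d
    let p := divStep (PySem.Int.mod c 5) t
    (PySem.Int.floordiv c 5 :: p.1, p.2)

-- `while work and work[0] == 0: work.pop(0)`
def stripLead : List Int → List Int
  | [] => []
  | d :: t => if d = 0 then stripLead t else d :: t

-- the outer `while work:` loop; the fuel argument only makes the loop total in Lean
-- (length + 14 provably exceeds the number of base-5 digits for Dom/Pre inputs)
def loopB : Nat → List Int → List Int
  | 0, _ => []
  | fuel + 1, work =>
    if work = [] then []
    else
      let p := divStep 0 work
      p.2 :: loopB fuel (stripLead p.1)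

def base3_to_base5_alt (base3_array : List Int) : List Int :=
  let work := stripLead base3_array.reverse
  if work = [] then [0] else loopB (work.length + 14) work

-- ===== PRECONDITION & SPEC =====
-- Pre_ excludes lists with a negative entry: those are not base-3 digit arrays, A's
-- value there ([] or the base-5 digits of an unrelated number) is an accident of its
-- decimal detour, and B's long division need not terminate on them.
def Pre_base3_to_base5 (base3_array : List Int) : Prop := ∀ d ∈ base3_array, 0 ≤ d
instance (base3_array : List Int) : Decidable (Pre_base3_to_base5 base3_array) := by
  unfold Pre_base3_to_base5; infer_instance

def pvWitness_base3_to_base5 : List Int := [1, 2, 0, 2]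

def Spec_base3_to_base5 (base3_array : List Int) (out : List Int) : Prop := out = base3_to_base5_alt base3_array
instance (base3_array : List Int) (out : List Int) : Decidable (Spec_base3_to_base5 base3_array out) := by unfold Spec_base3_to_base5; infer_instance

-- ===== CLAIM (what is proved, stated in full; the proofs are below) =====
def Claim_equal_base3_to_base5 : Prop := ∀ (base3_array : List Int), Dom_base3_to_base5 base3_array → Pre_base3_to_base5 base3_array → Spec_base3_to_base5 base3_array (base3_to_base5 base3_array)

-- ===== LEMMAS AND PROOFS =====

-- value of a digit list read most-significant-first, Horner style, from seed a
def vb (a : Int) (l : List Int) : Int := l.foldl (fun acc d => acc * 3 + d) a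

theorem vb_nil (a : Int) : vb a [] = a := rfl

theorem vb_cons (a d : Int) (t : List Int) : vb a (d :: t) = vb (a * 3 + d) t := rfl

theorem vb_ge (l : List Int) : ∀ a : Int, 0 ≤ a → (∀ d ∈ l, 0 ≤ d) → a ≤ vb a l := by
  induction l with
  | nil => intro a _ _; simp [vb_nil]
  | cons d t ih =>
    intro a ha h
    rw [vb_cons]
    have hd : 0 ≤ d := h d (List.mem_cons_self ..)
    have := ih (a * 3 + d) (by omega) (fun e he => h e (List.mem_cons_of_mem _ he))
    omega

theorem vb_linear (l : List Int) : ∀ a : Int, vb a l = a * 3 ^ l.length + vb 0 l := by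
  induction l with
  | nil => intro a; simp [vb_nil]
  | cons d t ih =>
    intro a
    rw [vb_cons, vb_cons, ih (a * 3 + d), ih (0 * 3 + d)]
    simp [List.length_cons]
    ring

theorem divStep_len (l : List Int) : ∀ c : Int, (divStep c l).1.length = l.length := by
  induction l with
  | nil => intro c; rfl
  | cons d t ih => intro c; simp [divStep, ih]

theorem divStep_spec (l : List Int) : ∀ c : Int, 0 ≤ c → c < 5 → (∀ d ∈ l, 0 ≤ d) →
    vb c l = 5 * vb 0 (divStep c l).1 + (divStep c l).2
    ∧ 0 ≤ (divStep c l).2 ∧ (divStep c l).2 < 5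
    ∧ (∀ e ∈ (divStep c l).1, 0 ≤ e) := by
  induction l with
  | nil =>
    intro c hc0 hc5 _
    refine ⟨by simp [divStep, vb_nil], hc0, hc5, by simp [divStep]⟩
  | cons d t ih =>
    intro c hc0 hc5 hnn
    have hd : 0 ≤ d := hnn d (List.mem_cons_self ..)
    set c' : Int := c * 3 + d with hc'
    have hc'0 : 0 ≤ c' := by omega
    have hm0 : 0 ≤ PySem.Int.mod c' 5 := PySem.Int.mod_nonneg c' (by norm_num)
    have hm5 : PySem.Int.mod c' 5 < 5 := PySem.Int.mod_lt c' (by norm_num)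
    have hfm : PySem.Int.floordiv c' 5 * 5 + PySem.Int.mod c' 5 = c' :=
      PySem.Int.floordiv_mul_add_mod c' 5
    have hq0 : 0 ≤ PySem.Int.floordiv c' 5 := by omega
    obtain ⟨hval, hr0, hr5, hqn⟩ :=
      ih (PySem.Int.mod c' 5) hm0 hm5 (fun e he => hnn e (List.mem_cons_of_mem _ he))
    have hlen : (divStep (PySem.Int.mod c' 5) t).1.length = t.length := divStep_len t _
    refine ⟨?_, hr0, hr5, ?_⟩
    · show vb c (d :: t) = _
      rw [vb_cons]
      simp only [divStep]
      have h1 := vb_linear t c'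
      have h2 := vb_linear t (PySem.Int.mod c' 5)
      have h3 := vb_linear (divStep (PySem.Int.mod c' 5) t).1 (PySem.Int.floordiv c' 5)
      rw [vb_cons]
      rw [show ((0:Int) * 3 + PySem.Int.floordiv c' 5) = PySem.Int.floordiv c' 5 by ring]
      rw [h3, hlen]
      -- vb c' t = c'·3^k + vb 0 t ; substitute c' = 5q + r and use hval
      have hsum : vb c' t = 5 * (PySem.Int.floordiv c' 5) * 3 ^ t.length
          + vb (PySem.Int.mod c' 5) t := by
        rw [h1, h2]; linear_combination (-(3 ^ t.length : Int)) * hfm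
      rw [hsum, hval]; ring
    · intro e he
      simp only [divStep, List.mem_cons] at he
      rcases he with rfl | he
      · exact hq0
      · exact hqn e he

theorem stripLead_subset (l : List Int) : ∀ d ∈ stripLead l, d ∈ l := by
  induction l with
  | nil => simp [stripLead]
  | cons d t ih =>
    intro e he
    by_cases h : d = 0
    · simp only [stripLead, if_pos h] at he
      exact List.mem_cons_of_mem _ (ih e he)
    · simp only [stripLead, if_neg h] at he
      exact he

theorem stripLead_vb (l : List Int) : vb 0 (stripLead l) = vb 0 l := by
  induction l with
  | nil => rfl
  | cons d t ih =>
    by_cases h : d = 0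
    · subst h
      rw [show stripLead (0 :: t) = stripLead t from by simp [stripLead], ih, vb_cons]
      norm_num
    · simp only [stripLead, if_neg h]

theorem stripLead_shape (l : List Int) :
    stripLead l = [] ∨ ∃ d t, stripLead l = d :: t ∧ d ≠ 0 := by
  induction l with
  | nil => exact Or.inl rfl
  | cons d t ih =>
    by_cases h : d = 0
    · simpa only [stripLead, if_pos h] using ih
    · exact Or.inr ⟨d, t, by simp [stripLead, if_neg h], h⟩

theorem stripLead_idem (l : List Int) : stripLead (stripLead l) = stripLead l := by
  rcases stripLead_shape l with h | ⟨d, t, h, hd⟩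
  · rw [h]; rfl
  · rw [h]; simp [stripLead, if_neg hd]

theorem vb_pos_of_strip_ne (l : List Int) (hnn : ∀ d ∈ l, 0 ≤ d)
    (hne : stripLead l ≠ []) : 0 < vb 0 l := by
  rcases stripLead_shape l with h | ⟨d, t, h, hd⟩
  · exact absurd h hne
  · have hnn' : ∀ e ∈ d :: t, 0 ≤ e := by
      intro e he; exact hnn e (stripLead_subset l e (h ▸ he))
    have hd0 : 0 ≤ d := hnn' d (List.mem_cons_self ..)
    have := vb_ge t (0 * 3 + d) (by omega)
      (fun e he => hnn' e (List.mem_cons_of_mem _ he))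
    rw [← stripLead_vb l, h, vb_cons]
    omega

theorem aConv_pos (d : Int) (h : 0 < d) :
    aConv d = PySem.Int.mod d 5 :: aConv (PySem.Int.floordiv d 5) := by
  rw [aConv]; simp [h]

theorem aConv_nonpos (d : Int) (h : ¬ 0 < d) : aConv d = [] := by
  rw [aConv]; simp [h]

theorem loopB_eq (fuel : Nat) : ∀ work : List Int, (∀ d ∈ work, 0 ≤ d) →
    stripLead work = work → vb 0 work < 5 ^ fuel →
    loopB fuel work = aConv (vb 0 work) := by
  induction fuel with
  | zero =>
    intro work hnn hs hlt
    by_cases hne : work = []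
    · subst hne
      simp [loopB, vb_nil, aConv_nonpos 0 (by norm_num)]
    · -- work ≠ [] would force 0 < vb 0 work, contradicting vb 0 work < 5^0 = 1
      exfalso
      have := vb_pos_of_strip_ne work hnn (by rw [hs]; exact hne)
      simp only [pow_zero] at hlt
      omega
  | succ fuel ih =>
    intro work hnn hs hlt
    by_cases hne : work = []
    · subst hne
      simp [loopB, vb_nil, aConv_nonpos 0 (by norm_num)]
    · have hv : 0 < vb 0 work := vb_pos_of_strip_ne work hnn (by rw [hs]; exact hne)
      obtain ⟨hval, hr0, hr5, hqn⟩ := divStep_spec work 0 le_rfl (by norm_num) hnn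
      set q := (divStep 0 work).1 with hq
      set r := (divStep 0 work).2 with hr
      -- A's step: vb 0 work = 5 * vb 0 q + r  gives mod/floordiv of the value
      have hmod : PySem.Int.mod (vb 0 work) 5 = r := by
        rw [PySem.Int.mod_eq_emod_of_pos (by norm_num)]; omega
      have hdiv : PySem.Int.floordiv (vb 0 work) 5 = vb 0 q := by
        rw [PySem.Int.floordiv_eq_ediv_of_pos (by norm_num)]; omega
      have hQnn : ∀ d ∈ stripLead q, 0 ≤ d :=
        fun d hd => hqn d (stripLead_subset q d hd)
      have hQv : vb 0 (stripLead q) = vb 0 q := stripLead_vb q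
      have hQlt : vb 0 (stripLead q) < 5 ^ fuel := by
        rw [hQv]
        have : (5:Int) ^ (fuel + 1) = 5 ^ fuel * 5 := pow_succ 5 fuel
        omega
      have hrec := ih (stripLead q) hQnn (stripLead_idem q) hQlt
      simp only [loopB, if_neg hne]
      rw [aConv_pos _ hv, hmod, hdiv]
      rw [hrec, hQv]


-- size bound: Dom-sized nonnegative digits keep the value under 2^31·3^n < 5^(n+14)
theorem vb_lt (l : List Int) : ∀ a : Int, 0 ≤ a →
    (∀ d ∈ l, 0 ≤ d ∧ d ≤ 2147483648) →
    vb a l < (a + 2147483649) * 3 ^ l.length := by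
  induction l with
  | nil => intro a ha _; simp [vb_nil]
  | cons d t ih =>
    intro a ha h
    obtain ⟨hd0, hdM⟩ := h d (List.mem_cons_self ..)
    have h1 := ih (a * 3 + d) (by omega) (fun e he => h e (List.mem_cons_of_mem _ he))
    rw [vb_cons]
    have h3 : (0:Int) < 3 ^ t.length := by positivity
    calc vb (a * 3 + d) t < (a * 3 + d + 2147483649) * 3 ^ t.length := h1
      _ ≤ ((a + 2147483649) * 3) * 3 ^ t.length := by nlinarith
      _ = (a + 2147483649) * 3 ^ (d :: t).length := by
          rw [List.length_cons, pow_succ]; ring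

theorem pow5_bound (n : Nat) : (2147483649 : Int) * 3 ^ n < 5 ^ (n + 14) := by
  have h1 : (2147483649 : Int) < 5 ^ 14 := by norm_num
  have h2 : (3 : Int) ^ n ≤ 5 ^ n := by gcongr; norm_num
  have h3 : (0:Int) < 3 ^ n := by positivity
  calc (2147483649 : Int) * 3 ^ n < 5 ^ 14 * 5 ^ n := by nlinarith
    _ = 5 ^ (n + 14) := by rw [pow_add]; ring

-- ===== VERDICT (by name: the statement is the Claim_ definition above) =====
theorem base3_to_base5_spec : Claim_equal_base3_to_base5 := by
  intro xs hdom hpre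
  unfold Spec_base3_to_base5
  -- facts about the digits of xs.reverse
  have hnnR : ∀ d ∈ xs.reverse, 0 ≤ d := by
    intro d hd; exact hpre d (List.mem_reverse.mp hd)
  have hdomR : ∀ d ∈ xs.reverse, 0 ≤ d ∧ d ≤ 2147483648 := by
    intro d hd
    have hx := List.mem_reverse.mp hd
    refine ⟨hpre d hx, ?_⟩
    unfold Dom_base3_to_base5 at hdom
    rw [List.all_eq_true] at hdom
    have := hdom d hx
    simp [pvDomInt] at this
    omega
  have hAdec : (xs.reverse).foldl (fun acc digit => acc * 3 + digit) 0 = vb 0 xs.reverse := rfl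
  by_cases h0 : vb 0 xs.reverse = 0
  · -- zero value: A returns [0]; B strips everything and returns [0]
    have hstrip : stripLead xs.reverse = [] := by
      by_contra hne
      have := vb_pos_of_strip_ne xs.reverse hnnR hne
      omega
    simp [base3_to_base5, base3_to_base5_alt, hAdec, h0, hstrip]
  · -- positive value
    have hge : 0 ≤ vb 0 xs.reverse := vb_ge xs.reverse 0 le_rfl hnnR
    have hpos : 0 < vb 0 xs.reverse := by omega
    set w := stripLead xs.reverse with hw
    have hwv : vb 0 w = vb 0 xs.reverse := stripLead_vb xs.reverse
    have hwne : w ≠ [] := by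
      intro hnil
      rw [hnil] at hwv
      simp [vb_nil] at hwv
      omega
    have hwnn : ∀ d ∈ w, 0 ≤ d := fun d hd => hnnR d (stripLead_subset _ d hd)
    have hwdom : ∀ d ∈ w, 0 ≤ d ∧ d ≤ 2147483648 :=
      fun d hd => hdomR d (stripLead_subset _ d hd)
    have hbound : vb 0 w < 5 ^ (w.length + 14) := by
      have h1 := vb_lt w 0 le_rfl hwdom
      have h2 := pow5_bound w.length
      simp only [zero_add] at h1
      omega
    have hloop := loopB_eq (w.length + 14) w hwnn (stripLead_idem xs.reverse) hbound
    simp only [base3_to_base5, base3_to_base5_alt, hAdec, if_neg h0, ← hw, if_neg hwne,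
      hloop, hwv]
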